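-- pv_equiv track=rewrite | github.com/notoxicpeople/genetic-distil-for-code-gen | src/util/code_extract.py | simple_extract_python_code
-- ===== SOURCE A (Python) =====
-- def simple_extract_python_code(text):
--     # def で始まる行を抽出
--     start = text.find("def ")
--
--     # def が見つからない場合は、元のテキストを返す
--     if start == -1:
--         return text
--
--     # def で始まる行の次の行を抽出
--     end = text.find("\n", start)
--     while end != -1:
--         # 次の行が空行の場合は、次の行を抽出
--         while end + 1 < len(text) and text[end + 1] == "\n":
--             end = text.find("\n", end + 1)
--
--         # レンジ外の場合またはスペースでない場合は、抽出を終了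
--         if end + 1 >= len(text) or text[end + 1] != " ":
--             break
--         end = text.find("\n", end + 1)
--
--     if end == -1:
--         return text
--
--     extracted_code = text[:end]
--
--     return extracted_code
-- ===== SOURCE B (Python) =====
-- def simple_extract_python_code(text):
--     # Line-oriented rewrite: split the text into lines once, classify each whole
--     # line (empty / indented / other) instead of scanning characters at newline
--     # positions, and rebuild the cut offset from the kept lines' lengths.
--     start = text.find("def ")
--     if start == -1:
--         return text
--     lines = text.split("\n")
--     last = len(lines) - 1
--     i = text[:start].count("\n") + 1   # first line after the one holding "def "
--     while i <= last:
--         line = lines[i]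
--         if i == last:
--             if line.startswith(" "):
--                 return text        # indented final line: no newline ends it
--             break                  # empty or dedented final line: cut before it
--         if line == "" or line.startswith(" "):
--             i += 1                 # blank or continuation line: keep it
--             continue
--         break                      # dedented line: cut before it
--     if i > last:
--         return text                # "def " sits on the last line
--     end = sum(len(lines[t]) + 1 for t in range(i)) - 1
--     return text[:end]
-- ===== Notes on version B (the rewrite author's own statement) =====
-- stated objective: alternative
-- what changed: Replaces A's character-position scan with nested text.find loops by a line-oriented algorithm: split the text into lines once, classify whole lines (empty / indented / other) while walking the line list, and rebuild the cut offset by summing the kept lines' lengths.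
import Mathlib
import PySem

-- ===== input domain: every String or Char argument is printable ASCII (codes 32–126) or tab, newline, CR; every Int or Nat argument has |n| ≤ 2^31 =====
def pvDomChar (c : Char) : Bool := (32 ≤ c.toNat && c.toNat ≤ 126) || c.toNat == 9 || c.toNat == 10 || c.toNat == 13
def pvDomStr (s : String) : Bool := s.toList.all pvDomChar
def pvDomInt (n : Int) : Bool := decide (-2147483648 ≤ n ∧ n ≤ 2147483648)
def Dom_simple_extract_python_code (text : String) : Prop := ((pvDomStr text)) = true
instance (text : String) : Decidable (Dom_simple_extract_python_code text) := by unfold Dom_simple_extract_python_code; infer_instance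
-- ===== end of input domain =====

-- B replaces A's character-position scan (nested text.find loops) by a line-oriented algorithm: split the text into lines once, classify whole lines, and rebuild the cut offset from the kept lines' lengths (objective: alternative; same asymptotic cost).

-- ===== PORT A =====
-- inner 'while end + 1 < len(text) and text[end+1] == "\n": end = text.find("\n", end+1)'
-- (fueled: each iteration moves 'end' forward, so text.toList.length + 1 steps always suffice)
def pvSkipBlank (text : String) : Int → Nat → Int
  | e, 0 => e
  | e, fuel+1 =>
    if e + 1 < PySem.Str.len text ∧ PySem.Str.pyGet? text (e + 1) = some '\n' then
      pvSkipBlank text (PySem.Str.findFrom text "\n" (e + 1)) fuel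
    else e

-- outer 'while end != -1: …' (fueled likewise)
def pvLoopA (text : String) : Int → Nat → Int
  | e, 0 => e
  | e, fuel+1 =>
    if e = -1 then e
    else
      let e1 := pvSkipBlank text e (text.toList.length + 1)
      if e1 + 1 ≥ PySem.Str.len text ∨ PySem.Str.pyGet? text (e1 + 1) ≠ some ' ' then e1
      else pvLoopA text (PySem.Str.findFrom text "\n" (e1 + 1)) fuel

def simple_extract_python_code (text : String) : String :=
  let start := PySem.Str.find text "def "
  if start = -1 then text
  else
    let e := pvLoopA text (PySem.Str.findFrom text "\n" start) (text.toList.length + 2)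
    if e = -1 then text
    else PySem.Str.slice text none (some e)

-- ===== PORT B =====
-- 'while i <= last: …' of Source B (recursion on i; none = 'return text', some i = 'break' cutting before line i)
def pvWalkLines (lines : List (List Char)) (last : Nat) (i : Nat) : Option Nat :=
  if _h : i ≤ last then
    -- line := lines[i]  (inlined)
    if i = last then
      (if PySem.Chars.startswith (lines.getD i []) [' '] then none else some i)
    else if lines.getD i [] = [] ∨ PySem.Chars.startswith (lines.getD i []) [' '] then
      pvWalkLines lines last (i+1)
    else some i
  else none
  termination_by last + 1 - i

def simple_extract_python_code_alt (text : String) : String :=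
  let start := PySem.Str.find text "def "
  if start = -1 then text
  else
    let lines := PySem.Chars.splitOn text.toList "\n".toList
    let last := lines.length - 1
    let i0 := PySem.Str.count (PySem.Str.slice text none (some start)) "\n" + 1
    match pvWalkLines lines last i0 with
    | none => text
    | some i =>
      let e : Int := (((List.range i).map (fun t => ((lines.getD t []).length : Int) + 1)).sum) - 1
      PySem.Str.slice text none (some e)

-- ===== PRECONDITION & SPEC =====
def Spec_simple_extract_python_code (text : String) (out : String) : Prop := out = simple_extract_python_code_alt text
instance (text : String) (out : String) : Decidable (Spec_simple_extract_python_code text out) := by unfold Spec_simple_extract_python_code; infer_instance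

-- ===== CLAIM (what is proved, stated in full; the proofs are below) =====
def Claim_equal_simple_extract_python_code : Prop := ∀ (text : String), Dom_simple_extract_python_code text → Spec_simple_extract_python_code text (simple_extract_python_code text)

-- ===== LEMMAS AND PROOFS =====

-- the list of newline positions from k on (proof-side abstraction of A's repeated text.find calls)
def pvNl (text : String) (k : Nat) : List Int :=
  (PySem.List.pyRange (k : Int) (PySem.Str.len text)).filter
    (fun i => PySem.Str.pyGet? text i == some '\n')

-- result of A's inner blank-skipping loop, as a pure function on positions
def pvEndRun (text : String) (k : Nat) : Nat :=
  if h : k + 1 < text.toList.length ∧ text.toList[k+1]? = some '\n' then pvEndRun text (k+1) else k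
  termination_by text.toList.length - k
  decreasing_by omega

-- proof-side abstraction: A's outer loop as a flat walk over the newline positions
def pvWalkB (text : String) : List Int → Option Int
  | [] => none
  | p :: rest =>
    if p + 1 < PySem.Str.len text ∧ PySem.Str.pyGet? text (p + 1) = some '\n' then
      pvWalkB text rest
    else if p + 1 ≥ PySem.Str.len text ∨ PySem.Str.pyGet? text (p + 1) ≠ some ' ' then
      some p
    else pvWalkB text rest

theorem pv_prefix_singleton (c : Char) (l : List Char) : [c] <+: l ↔ l.head? = some c := by
  cases l with
  | nil => simp
  | cons a t => simp [List.cons_prefix_cons, eq_comm]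

theorem pv_match_at (s : List Char) (i : Nat) : [ '\n' ] <+: s.drop i ↔ s[i]? = some '\n' := by
  rw [pv_prefix_singleton, List.head?_eq_getElem?]
  simp [List.getElem?_drop]

theorem pvNl_ge (text : String) (k : Nat) (h : text.toList.length ≤ k) : pvNl text k = [] := by
  unfold pvNl
  rw [PySem.List.pyRange_one_eq_nil (by simp [pysem]; exact_mod_cast h)]
  simp

theorem pvNl_dec (text : String) (k : Nat) (h : k < text.toList.length) :
    pvNl text k = (if text.toList[k]? = some '\n' then [(k : Int)] else []) ++ pvNl text (k+1) := by
  unfold pvNl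
  rw [PySem.List.pyRange_one_cons (show (k:Int) < PySem.Str.len text by simp [pysem]; exact_mod_cast h)]
  rw [List.filter_cons]
  have hc : ((k:Int) + 1) = ((k+1 : Nat) : Int) := by push_cast; ring
  rw [hc]
  by_cases hnl : text.toList[k]? = some '\n' <;> simp [pysem, hnl]

theorem pvNl_mem (text : String) {k j : Nat} (hkj : k ≤ j) (hj : text.toList[j]? = some '\n') :
    (j : Int) ∈ pvNl text k := by
  unfold pvNl
  rw [List.mem_filter, PySem.List.mem_pyRange_one]
  have hjl : j < text.toList.length := (List.getElem?_eq_some_iff.mp hj).choose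
  refine ⟨⟨by exact_mod_cast hkj, by simp [pysem]; exact_mod_cast hjl⟩, by simp [pysem, hj]⟩

theorem pvNl_head (text : String) (k : Nat) (p : Int) (rest : List Int)
    (h : pvNl text k = p :: rest) :
    ∃ m : Nat, p = (m : Int) ∧ k ≤ m ∧ m < text.toList.length ∧ text.toList[m]? = some '\n' ∧
      rest = pvNl text (m+1) ∧ ∀ i, k ≤ i → i < m → text.toList[i]? ≠ some '\n' := by
  by_cases hk : k < text.toList.length
  · rw [pvNl_dec text k hk] at h
    by_cases hnl : text.toList[k]? = some '\n'
    · simp [hnl] at h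
      exact ⟨k, h.1.symm, le_rfl, hk, hnl, h.2.symm, fun i h1 h2 _ => by omega⟩
    · simp [hnl] at h
      obtain ⟨m, hpm, hkm, hml, hmnl, hr, hmin⟩ := pvNl_head text (k+1) p rest h
      refine ⟨m, hpm, by omega, hml, hmnl, hr, fun i h1 h2 => ?_⟩
      rcases Nat.eq_or_lt_of_le h1 with h1 | h1
      · exact h1 ▸ hnl
      · exact hmin i h1 h2
  · rw [pvNl_ge text k (by omega)] at h; cases h
  termination_by text.toList.length - k
  decreasing_by simp only [String.toList] at *; omega

theorem pv_findFrom_eq_head (text : String) (k : Nat) (hk : k ≤ text.toList.length) :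
    PySem.Str.findFrom text "\n" (k : Int) =
      (match pvNl text k with | [] => -1 | p :: _ => p) := by
  rw [PySem.Str.findFrom_eq]
  have hlist : "\n".toList = ['\n'] := by decide
  rw [hlist]
  cases hL : pvNl text k with
  | nil =>
    rw [PySem.Chars.findFrom_natCast_eq_neg_one_iff text.toList ['\n'] k hk]
    rw [List.singleton_infix_iff]
    intro hmem
    obtain ⟨i, hi⟩ := List.getElem?_of_mem hmem
    rw [List.getElem?_drop] at hi
    have := pvNl_mem text (k := k) (j := k + i) (by omega) hi
    simp [hL] at this
  | cons p rest =>
    obtain ⟨m, hpm, hkm, hml, hmnl, hr, hmin⟩ := pvNl_head text k p rest hL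
    have hne : PySem.Chars.findFrom text.toList ['\n'] (k : Int) ≠ -1 := by
      intro hcon
      rw [PySem.Chars.findFrom_natCast_eq_neg_one_iff text.toList ['\n'] k hk,
        List.singleton_infix_iff] at hcon
      have hidx : (text.toList.drop k)[m - k]? = some '\n' := by
        rw [List.getElem?_drop, show k + (m - k) = m by omega]
        exact hmnl
      exact hcon (List.mem_of_getElem? hidx)
    obtain ⟨h1, h2, h3⟩ := PySem.Chars.findFrom_natCast_spec text.toList ['\n'] k hk hne
    set r := PySem.Chars.findFrom text.toList ['\n'] (k : Int) with hrdef
    have hr0 : 0 ≤ r := le_trans (by exact_mod_cast Int.natCast_nonneg k) h1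
    have hkr : k ≤ r.toNat := by omega
    have hrnl : text.toList[r.toNat]? = some '\n' := (pv_match_at text.toList r.toNat).mp h2
    have hrm : r.toNat = m := by
      rcases lt_trichotomy r.toNat m with h | h | h
      · exact absurd hrnl (hmin r.toNat hkr h)
      · exact h
      · exact absurd ((pv_match_at text.toList m).mpr hmnl) (h3 m hkm h)
    show r = p
    rw [hpm]
    omega

theorem pvCond_iff (text : String) (j : Nat) (c : Char) :
    ((j : Int) < PySem.Str.len text ∧ PySem.Str.pyGet? text (j : Int) = some c) ↔
      (j < text.toList.length ∧ text.toList[j]? = some c) := by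
  constructor
  · rintro ⟨h1, h2⟩
    refine ⟨by simp [pysem] at h1; exact_mod_cast h1, by simpa [pysem] using h2⟩
  · rintro ⟨h1, h2⟩
    refine ⟨by simp [pysem]; exact_mod_cast h1, by simpa [pysem] using h2⟩

theorem pvCond2_iff (text : String) (j : Nat) :
    ((j : Int) ≥ PySem.Str.len text ∨ PySem.Str.pyGet? text (j : Int) ≠ some ' ') ↔
      ¬ (j < text.toList.length ∧ text.toList[j]? = some ' ') := by
  rw [← pvCond_iff text j ' ']
  constructor
  · rintro (h | h) ⟨h1, h2⟩
    · exact absurd h1 (not_lt.mpr h)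
    · exact h h2
  · intro h
    by_cases h1 : (j : Int) < PySem.Str.len text
    · exact Or.inr (fun h2 => h ⟨h1, h2⟩)
    · exact Or.inl (not_lt.mp h1)

theorem pvEndRun_ge (text : String) (k : Nat) : k ≤ pvEndRun text k := by
  rw [pvEndRun]
  split
  · next h2 => have := pvEndRun_ge text (k+1); omega
  · exact le_rfl
  termination_by text.toList.length - k
  decreasing_by simp only [String.toList] at *; omega

theorem pvEndRun_lt (text : String) (k : Nat) (h : k < text.toList.length) :
    pvEndRun text k < text.toList.length := by
  rw [pvEndRun]
  split
  · next h2 => exact pvEndRun_lt text (k+1) h2.1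
  · exact h
  termination_by text.toList.length - k
  decreasing_by simp only [String.toList] at *; omega

theorem pvEndRun_nl (text : String) (k : Nat) (h : text.toList[k]? = some '\n') :
    text.toList[pvEndRun text k]? = some '\n' := by
  rw [pvEndRun]
  split
  · next h2 => exact pvEndRun_nl text (k+1) h2.2
  · exact h
  termination_by text.toList.length - k
  decreasing_by simp only [String.toList] at *; omega

theorem pvEndRun_stop (text : String) (k : Nat) :
    ¬ (pvEndRun text k + 1 < text.toList.length ∧ text.toList[pvEndRun text k + 1]? = some '\n') := by
  rw [pvEndRun]
  split
  · next h2 => exact pvEndRun_stop text (k+1)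
  · next h2 => exact h2
  termination_by text.toList.length - k
  decreasing_by simp only [String.toList] at *; omega

theorem pvSkip_spec (text : String) (fuel k : Nat) (h : text.toList.length - k ≤ fuel) :
    pvSkipBlank text (k : Int) fuel = (pvEndRun text k : Int) := by
  induction fuel generalizing k with
  | zero =>
    rw [pvEndRun, dif_neg (by omega), pvSkipBlank]
  | succ f ih =>
    have hcast : (k : Int) + 1 = ((k+1 : Nat) : Int) := by push_cast; ring
    rw [pvSkipBlank]
    by_cases hc : k+1 < text.toList.length ∧ text.toList[k+1]? = some '\n'
    · rw [if_pos (by rw [hcast]; exact (pvCond_iff text (k+1) '\n').mpr hc)]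
      have hf : PySem.Str.findFrom text "\n" ((k : Int) + 1) = ((k+1 : Nat) : Int) := by
        rw [hcast, pv_findFrom_eq_head text (k+1) (by omega),
          pvNl_dec text (k+1) hc.1, if_pos hc.2]
        rfl
      rw [hf, ih (k+1) (by omega)]
      conv_rhs => rw [pvEndRun]
      rw [dif_pos hc]
    · rw [if_neg (by rw [hcast]; exact fun hcon => hc ((pvCond_iff text (k+1) '\n').mp hcon)),
        pvEndRun, dif_neg hc]

theorem pvWalk_run (text : String) (k : Nat) :
    pvWalkB text ((k : Int) :: pvNl text (k+1)) =
      pvWalkB text ((pvEndRun text k : Int) :: pvNl text (pvEndRun text k + 1)) := by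
  have hcast : (k : Int) + 1 = ((k+1 : Nat) : Int) := by push_cast; ring
  by_cases hc : k+1 < text.toList.length ∧ text.toList[k+1]? = some '\n'
  · have hdec : pvNl text (k+1) = ((k+1 : Nat) : Int) :: pvNl text (k+2) := by
      rw [pvNl_dec text (k+1) hc.1, if_pos hc.2]
      rfl
    rw [hdec, pvWalkB, if_pos (by rw [hcast]; exact (pvCond_iff text (k+1) '\n').mpr hc)]
    rw [pvWalk_run text (k+1)]
    rw [show pvEndRun text k = pvEndRun text (k+1) by rw [pvEndRun]; rw [dif_pos hc]]
  · rw [show pvEndRun text k = k by rw [pvEndRun]; rw [dif_neg hc]]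
  termination_by text.toList.length - k
  decreasing_by simp only [String.toList] at *; omega

theorem pvLoopA_neg_one (text : String) (f : Nat) : pvLoopA text (-1) f = -1 := by
  cases f <;> simp [pvLoopA]

theorem pvNl_len_step (text : String) (k : Nat) :
    (pvNl text (k+1)).length ≤ (pvNl text k).length := by
  by_cases hk : k < text.toList.length
  · rw [pvNl_dec text k hk]
    by_cases hnl : text.toList[k]? = some '\n' <;> simp [hnl]
  · rw [pvNl_ge text k (by omega), pvNl_ge text (k+1) (by omega)]

theorem pvNl_len_mono (text : String) {k k' : Nat} (h : k ≤ k') :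
    (pvNl text k').length ≤ (pvNl text k).length := by
  induction k', h using Nat.le_induction with
  | base => exact le_rfl
  | succ n hn ih => exact le_trans (pvNl_len_step text n) ih

theorem pvMain (text : String) (fuel : Nat) : ∀ (m : Nat), m < text.toList.length →
    text.toList[m]? = some '\n' → (pvNl text (m+1)).length + 2 ≤ fuel →
    pvLoopA text (m : Int) fuel =
      (match pvWalkB text ((m : Int) :: pvNl text (m+1)) with | none => -1 | some p => p) := by
  induction fuel with
  | zero => intro m _ _ hfuel; omega
  | succ f ih =>
    intro m hm hmnl hfuel
    have hskip : pvSkipBlank text (m : Int) (text.toList.length + 1) = (pvEndRun text m : Int) :=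
      pvSkip_spec text (text.toList.length + 1) m (by omega)
    have hrm := pvEndRun_ge text m
    have hrl := pvEndRun_lt text m hm
    have hrnl := pvEndRun_nl text m hmnl
    have hrstop := pvEndRun_stop text m
    have hwr := pvWalk_run text m
    generalize hrdef : pvEndRun text m = r at hskip hrm hrl hrnl hrstop hwr
    have hcast : (r : Int) + 1 = ((r+1 : Nat) : Int) := by push_cast; ring
    rw [pvLoopA, if_neg (show ¬((m : Int) = -1) by omega)]
    simp only [hskip]
    rw [hwr]
    have hA : ¬((r : Int) + 1 < PySem.Str.len text ∧ PySem.Str.pyGet? text ((r : Int) + 1) = some '\n') := by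
      rw [hcast]; exact fun hcon => hrstop ((pvCond_iff text (r+1) '\n').mp hcon)
    rw [pvWalkB, if_neg hA]
    by_cases hbr : (r : Int) + 1 ≥ PySem.Str.len text ∨ PySem.Str.pyGet? text ((r : Int) + 1) ≠ some ' '
    · rw [if_pos hbr, if_pos hbr]
    · rw [if_neg hbr, if_neg hbr]
      have hsp : r+1 < text.toList.length ∧ text.toList[r+1]? = some ' ' := by
        rw [hcast] at hbr
        exact not_not.mp ((pvCond2_iff text (r+1)).not.mp hbr)
      rw [hcast, pv_findFrom_eq_head text (r+1) (by omega)]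
      cases hL : pvNl text (r+1) with
      | nil => simp [pvWalkB, pvLoopA_neg_one]
      | cons p rest =>
        obtain ⟨m', hpm', hkm', hml', hmnl', hrest', _⟩ := pvNl_head text (r+1) p rest hL
        subst hpm'
        rw [ih m' hml' hmnl' ?_, hrest']
        have h1 : (pvNl text (r+1)).length ≤ (pvNl text (m+1)).length :=
          pvNl_len_mono text (by omega)
        rw [hL, hrest'] at h1
        simp at h1
        omega

-- ---------- B-side machinery: lines of a text ----------

-- the value of Python's text.split("\n"), as a structural recursion
def pvLines : List Char → List (List Char)
  | [] => [[]]
  | c :: r => if c = '\n' then [] :: pvLines r else (pvLines r).modifyHead (c :: ·)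

theorem pvLines_ne_nil (s : List Char) : pvLines s ≠ [] := by
  cases s with
  | nil => simp [pvLines]
  | cons c r =>
    simp only [pvLines]
    split
    · simp
    · cases h : pvLines r with
      | nil => exact absurd h (pvLines_ne_nil r)
      | cons a t => simp [h]

theorem pvModifyHead_id {α : Type} (L : List α) : List.modifyHead (fun x => x) L = L := by
  cases L <;> simp

theorem pvGo_eq (l : List Char) (fuel : Nat) (cur : List Char) (acc : List (List Char))
    (h : l.length ≤ fuel) :
    PySem.Chars.splitOn.go ['\n'] fuel l cur acc
      = acc.reverse ++ (pvLines l).modifyHead (cur.reverse ++ ·) := by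
  induction fuel generalizing l cur acc with
  | zero =>
    have : l = [] := by cases l <;> simp_all
    subst this
    simp [PySem.Chars.splitOn.go, pvLines]
  | succ f ih =>
    cases l with
    | nil => simp [PySem.Chars.splitOn.go, pvLines]
    | cons c r =>
      by_cases hc : c = '\n'
      · subst hc
        rw [show PySem.Chars.splitOn.go ['\n'] (f+1) ('\n' :: r) cur acc
              = PySem.Chars.splitOn.go ['\n'] f r [] (cur.reverse :: acc) by
            simp [PySem.Chars.splitOn.go, List.isPrefixOf]]
        rw [ih r [] (cur.reverse :: acc) (by simp at h; omega)]
        simp [pvLines, pvModifyHead_id]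
      · rw [show PySem.Chars.splitOn.go ['\n'] (f+1) (c :: r) cur acc
              = PySem.Chars.splitOn.go ['\n'] f r (c :: cur) acc by
            simp [PySem.Chars.splitOn.go, List.isPrefixOf, Ne.symm hc]]
        rw [ih r (c :: cur) acc (by simp at h; omega)]
        simp only [pvLines, if_neg hc]
        cases h : pvLines r with
        | nil => exact absurd h (pvLines_ne_nil r)
        | cons a t => simp [h]

theorem pvSplitOn_eq (s : List Char) : PySem.Chars.splitOn s ['\n'] = pvLines s := by
  have := pvGo_eq s (s.length + 1) [] [] (by omega)
  simpa [PySem.Chars.splitOn, pvModifyHead_id] using this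

theorem pvCountGo_eq (l : List Char) (fuel : Nat) (acc : Nat) (h : l.length ≤ fuel) :
    PySem.Chars.count.go ['\n'] fuel l acc = acc + l.count '\n' := by
  induction fuel generalizing l acc with
  | zero =>
    have : l = [] := by cases l <;> simp_all
    subst this
    simp [PySem.Chars.count.go]
  | succ f ih =>
    cases l with
    | nil => simp [PySem.Chars.count.go]
    | cons c r =>
      by_cases hc : c = '\n'
      · subst hc
        rw [show PySem.Chars.count.go ['\n'] (f+1) ('\n' :: r) acc
              = PySem.Chars.count.go ['\n'] f r (acc+1) by
            simp [PySem.Chars.count.go, List.isPrefixOf]]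
        rw [ih r (acc+1) (by simp at h; omega)]
        simp [List.count_cons]
        omega
      · rw [show PySem.Chars.count.go ['\n'] (f+1) (c :: r) acc
              = PySem.Chars.count.go ['\n'] f r acc by
            simp [PySem.Chars.count.go, List.isPrefixOf, Ne.symm hc]]
        rw [ih r acc (by simp at h; omega)]
        simp [List.count_cons, hc]

theorem pvCount_eq (s : List Char) : PySem.Chars.count s ['\n'] = s.count '\n' := by
  rw [show PySem.Chars.count s ['\n'] = PySem.Chars.count.go ['\n'] s.length s 0 by
    simp [PySem.Chars.count]]
  simpa using pvCountGo_eq s s.length 0 le_rfl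

theorem pvLines_length (s : List Char) : (pvLines s).length = s.count '\n' + 1 := by
  induction s with
  | nil => simp [pvLines]
  | cons c r ih =>
    by_cases hc : c = '\n'
    · subst hc; simp [pvLines, List.count_cons, ih]
    · simp [pvLines, hc, List.count_cons, ih]

theorem pvLines_no_nl (s : List Char) (h : '\n' ∉ s) : pvLines s = [s] := by
  induction s with
  | nil => simp [pvLines]
  | cons c r ih =>
    have hc : c ≠ '\n' := fun hcon => h (hcon ▸ List.mem_cons_self)
    rw [pvLines, if_neg hc, ih (fun hm => h (List.mem_cons_of_mem c hm))]
    simp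

theorem pvLines_first_nl (s : List Char) (q : Nat) (hq : q < s.length)
    (hnl : s[q]? = some '\n') (hmin : ∀ i, i < q → s[i]? ≠ some '\n') :
    pvLines s = s.take q :: pvLines (s.drop (q+1)) := by
  induction s generalizing q with
  | nil => simp at hq
  | cons c r ih =>
    cases q with
    | zero =>
      simp at hnl
      simp [pvLines, hnl]
    | succ q' =>
      have hc : c ≠ '\n' := by
        have := hmin 0 (by omega)
        simpa using this
      have hr : pvLines r = r.take q' :: pvLines (r.drop (q'+1)) := by
        refine ih q' (by simpa using hq) (by simpa using hnl) ?_
        intro i hi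
        have := hmin (i+1) (by omega)
        simpa using this
      rw [pvLines, if_neg hc, hr]
      simp

-- cumulative character offset of the start of line n (each line's length + its newline)
def pvSumFirst (L : List (List Char)) (n : Nat) : Int :=
  ((L.take n).map (fun l => (l.length : Int) + 1)).sum

theorem pvSumFirst_succ (L : List (List Char)) (n : Nat) (l : List Char) (h : L[n]? = some l) :
    pvSumFirst L (n+1) = pvSumFirst L n + l.length + 1 := by
  unfold pvSumFirst
  rw [List.take_succ, h]
  simp
  ring

theorem pvRangeSum (L : List (List Char)) (i : Nat) (h : i ≤ L.length) :
    (((List.range i).map (fun t => ((L.getD t []).length : Int) + 1)).sum) = pvSumFirst L i := by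
  induction i with
  | zero => simp [pvSumFirst]
  | succ n ih =>
    obtain ⟨l, hl⟩ : ∃ l, L[n]? = some l :=
      ⟨L[n]'(by omega), List.getElem?_eq_some_iff.mpr ⟨by omega, rfl⟩⟩
    rw [List.range_succ, List.map_append, List.sum_append, ih (by omega),
      pvSumFirst_succ L n l hl]
    simp [List.getD, hl]
    ring

-- counting newlines in a prefix is unchanged across a newline-free stretch
theorem pvCount_take_congr (s : List Char) (k m : Nat) (hkm : k ≤ m)
    (hmin : ∀ i, k ≤ i → i < m → s[i]? ≠ some '\n') :
    (s.take m).count '\n' = (s.take k).count '\n' := by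
  induction m, hkm using Nat.le_induction with
  | base => rfl
  | succ n hn ih =>
    rw [List.take_succ]
    rw [List.count_append, ih (fun i h1 h2 => hmin i h1 (by omega))]
    have : s[n]? ≠ some '\n' := hmin n hn (by omega)
    cases h : s[n]? with
    | none => simp [h]
    | some c =>
      have : c ≠ '\n' := fun hc => this (by rw [h, hc])
      simp [h, List.count_singleton, this]

theorem pvCount_take_drop (s : List Char) (k : Nat) :
    (s.take k).count '\n' + (s.drop k).count '\n' = s.count '\n' := by
  conv_rhs => rw [← List.take_append_drop k s]
  rw [List.count_append]

-- the master prefix lemma: if position m holds the (c)-th newline of s (c newlines before it),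
-- then line c+1 starts at offset m+1 and the lines from c+1 on are the lines of s.drop (m+1)
theorem pvPrefix (s : List Char) (m : Nat) (hm : m < s.length) (hnl : s[m]? = some '\n') :
    pvSumFirst (pvLines s) ((s.take m).count '\n' + 1) = (m : Int) + 1 ∧
    (pvLines s).drop ((s.take m).count '\n' + 1) = pvLines (s.drop (m+1)) ∧
    (s.take m).count '\n' + 1 ≤ (pvLines s).length - 1 := by
  induction s generalizing m with
  | nil => simp at hm
  | cons a r ih =>
    cases m with
    | zero =>
      simp at hnl
      subst hnl
      refine ⟨?_, ?_, ?_⟩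
      · simp [pvLines, pvSumFirst]
      · simp [pvLines]
      · have := pvLines_ne_nil r
        simp [pvLines, pvLines_length]
    | succ m' =>
      have hm' : m' < r.length := by simpa using hm
      have hnl' : r[m']? = some '\n' := by simpa using hnl
      obtain ⟨ih1, ih2, ih3⟩ := ih m' hm' hnl'
      by_cases ha : a = '\n'
      · subst ha
        have hcount : ((('\n' :: r).take (m'+1)).count '\n') = (r.take m').count '\n' + 1 := by
          simp [List.count_cons]
        refine ⟨?_, ?_, ?_⟩
        · rw [hcount]
          rw [show (r.take m').count '\n' + 1 + 1 = ((r.take m').count '\n' + 1) + 1 by ring]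
          unfold pvSumFirst at ih1 ⊢
          rw [show pvLines ('\n' :: r) = [] :: pvLines r by simp [pvLines]]
          rw [List.take_succ_cons]
          simp only [List.map_cons, List.sum_cons]
          rw [show (([] : List Char).length : Int) + 1 = 1 by simp]
          rw [ih1]
          push_cast
          ring
        · rw [hcount, show pvLines ('\n' :: r) = [] :: pvLines r by simp [pvLines]]
          simpa using ih2
        · rw [hcount, show pvLines ('\n' :: r) = [] :: pvLines r by simp [pvLines]]
          simp only [List.length_cons]
          omega
      · have hcount : (((a :: r).take (m'+1)).count '\n') = (r.take m').count '\n' := by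
          simp [List.count_cons, ha]
        have hstruct : pvLines (a :: r) = (pvLines r).modifyHead (a :: ·) := by
          simp [pvLines, ha]
        cases hL : pvLines r with
        | nil => exact absurd hL (pvLines_ne_nil r)
        | cons b t =>
          rw [hL] at ih1 ih2 ih3
          refine ⟨?_, ?_, ?_⟩
          · rw [hcount, hstruct, hL]
            unfold pvSumFirst at ih1 ⊢
            simp only [List.modifyHead, List.take_succ_cons, List.map_cons, List.sum_cons] at ih1 ⊢
            rw [show ((a :: b).length : Int) + 1 = ((b.length : Int) + 1) + 1 by push_cast [List.length_cons]; ring]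
            omega
          · rw [hcount, hstruct, hL]
            simpa using ih2
          · rw [hcount, hstruct, hL]
            simp only [List.modifyHead, List.length_cons] at ih3 ⊢
            omega

-- if there is no newline at or after k, the tail is newline-free
theorem pvNoNl_of_pvNl_nil (text : String) (k : Nat) (h : pvNl text k = []) :
    '\n' ∉ text.toList.drop k := by
  intro hmem
  obtain ⟨i, hi⟩ := List.getElem?_of_mem hmem
  rw [List.getElem?_drop] at hi
  have := pvNl_mem text (k := k) (j := k + i) (by omega) hi
  simp [h] at this

-- ---------- the walk correspondence ----------

theorem pvCorr (text : String) (p i : Nat) (hi : 1 ≤ i) (hp : p ≤ text.toList.length)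
    (hdrop : (pvLines text.toList).drop i = pvLines (text.toList.drop p))
    (hsum : pvSumFirst (pvLines text.toList) i = (p : Int)) :
    (match pvWalkLines (pvLines text.toList) ((pvLines text.toList).length - 1) i with
      | none => (none : Option Int)
      | some i' => some (pvSumFirst (pvLines text.toList) i' - 1))
      = pvWalkB text (((p : Int) - 1) :: pvNl text p) := by
  have hnd : (pvLines text.toList).drop i ≠ [] := by
    rw [hdrop]; exact pvLines_ne_nil _
  have hiL : i < (pvLines text.toList).length := by
    by_contra hcon
    exact hnd (List.drop_eq_nil_of_le (by omega))
  have hile : i ≤ (pvLines text.toList).length - 1 := by omega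
  have hlen : (pvLines text.toList).length - i = (text.toList.drop p).count '\n' + 1 := by
    rw [← pvLines_length (text.toList.drop p), ← hdrop, List.length_drop]
  have hgi : (pvLines text.toList)[i]? = (pvLines (text.toList.drop p))[0]? := by
    rw [← hdrop]
    simp [List.getElem?_drop]
  have hup : ∀ j : Nat, (text.toList.drop p)[j]? = text.toList[p + j]? := by
    intro j; simp [List.getElem?_drop]
  have hup0 : (text.toList.drop p)[0]? = text.toList[p]? := by simpa using hup 0
  have e1 : ((p : Int) - 1) + 1 = ((p : Nat) : Int) := by push_cast; ring
  cases hNL : pvNl text p with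
  | nil =>
    have hno : '\n' ∉ text.toList.drop p := pvNoNl_of_pvNl_nil text p hNL
    have hcz : (text.toList.drop p).count '\n' = 0 := by
      simpa using List.count_eq_zero.mpr hno
    have hlast : i = (pvLines text.toList).length - 1 := by omega
    have hu : pvLines (text.toList.drop p) = [text.toList.drop p] :=
      pvLines_no_nl _ hno
    have hline : (pvLines text.toList).getD i [] = text.toList.drop p := by
      rw [List.getD_eq_getElem?_getD, hgi, hu]
      simp
    have hA1 : ¬(((p : Int) - 1) + 1 < PySem.Str.len text ∧
        PySem.Str.pyGet? text (((p : Int) - 1) + 1) = some '\n') := by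
      rw [e1, pvCond_iff]
      rintro ⟨h1, h2⟩
      rw [← hup0] at h2
      exact hno (List.mem_of_getElem? h2)
    have hsw : PySem.Chars.startswith ((pvLines text.toList).getD i []) [' '] = true ↔
        text.toList[p]? = some ' ' := by
      rw [hline, PySem.Chars.startswith_iff, pv_prefix_singleton, List.head?_eq_getElem?, hup0]
    rw [pvWalkLines, dif_pos hile, if_pos hlast]
    rw [pvWalkB, if_neg hA1]
    by_cases hsp : text.toList[p]? = some ' '
    · have hB2 : ¬(((p : Int) - 1) + 1 ≥ PySem.Str.len text ∨
          PySem.Str.pyGet? text (((p : Int) - 1) + 1) ≠ some ' ') := by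
        rw [e1, pvCond2_iff]
        exact not_not.mpr ⟨(List.getElem?_eq_some_iff.mp hsp).choose, hsp⟩
      rw [if_neg hB2, if_pos (hsw.mpr hsp)]
      rfl
    · have hB2 : (((p : Int) - 1) + 1 ≥ PySem.Str.len text ∨
          PySem.Str.pyGet? text (((p : Int) - 1) + 1) ≠ some ' ') := by
        rw [e1, pvCond2_iff]
        exact fun hcon => hsp hcon.2
      rw [if_pos hB2, if_neg (fun hcon => hsp (hsw.mp hcon))]
      simp [hsum]
  | cons q rest =>
    obtain ⟨m, hqm, hpm, hml, hmnl, hrest, hmin⟩ := pvNl_head text p q rest hNL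
    have hq' : m - p < (text.toList.drop p).length := by
      rw [List.length_drop]; omega
    have hunl : (text.toList.drop p)[m - p]? = some '\n' := by
      rw [hup (m - p), show p + (m - p) = m from by omega]
      exact hmnl
    have humin : ∀ j, j < m - p → (text.toList.drop p)[j]? ≠ some '\n' := by
      intro j hj
      rw [hup j]
      exact hmin (p + j) (by omega) (by omega)
    have hufirst := pvLines_first_nl (text.toList.drop p) (m - p) hq' hunl humin
    have hcpos : 0 < (text.toList.drop p).count '\n' := by
      rcases List.count_pos_iff.mpr (List.mem_of_getElem? hunl) with h
      exact h
    have hnlast : i ≠ (pvLines text.toList).length - 1 := by omega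
    have hline : (pvLines text.toList).getD i [] = (text.toList.drop p).take (m - p) := by
      rw [List.getD_eq_getElem?_getD, hgi, hufirst]
      simp
    have hdrop' : (pvLines text.toList).drop (i+1) = pvLines (text.toList.drop (m+1)) := by
      have : (pvLines text.toList).drop (i+1) = ((pvLines text.toList).drop i).drop 1 := by
        rw [List.drop_drop]
      rw [this, hdrop, hufirst]
      simp [List.drop_drop, show p + (m - p + 1) = m + 1 by omega]
    have hLi : (pvLines text.toList)[i]? = some ((text.toList.drop p).take (m - p)) := by
      rw [hgi, hufirst]; simp
    have hsum' : pvSumFirst (pvLines text.toList) (i+1) = ((m + 1 : Nat) : Int) := by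
      rw [pvSumFirst_succ _ _ _ hLi, hsum]
      rw [List.length_take]
      push_cast
      omega
    rw [pvWalkLines, dif_pos hile, if_neg hnlast]
    by_cases hq0 : m - p = 0
    · -- empty next line: both sides skip it
      have hlempty : (pvLines text.toList).getD i [] = [] := by
        rw [hline, hq0]; simp
      have hA1 : (((p : Int) - 1) + 1 < PySem.Str.len text ∧
          PySem.Str.pyGet? text (((p : Int) - 1) + 1) = some '\n') := by
        rw [e1, pvCond_iff]
        have : p = m := by omega
        exact ⟨this ▸ hml, this ▸ hmnl⟩
      rw [if_pos (Or.inl hlempty), pvWalkB, if_pos hA1, hrest]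
      have hm1 : (q : Int) = ((m + 1 : Nat) : Int) - 1 := by rw [hqm]; push_cast; ring
      rw [hm1]
      exact pvCorr text (m+1) (i+1) (by omega) (by omega) hdrop' hsum'
    · have hne : (pvLines text.toList).getD i [] ≠ [] := by
        rw [hline]
        have : ((text.toList.drop p).take (m - p)).length = m - p := by
          rw [List.length_take]; omega
        intro hcon
        rw [hcon] at this
        simp at this
        omega
      have hhead : ((pvLines text.toList).getD i []).head? = text.toList[p]? := by
        rw [hline, ← hup0, List.head?_eq_getElem?, List.getElem?_take_of_lt (by omega),
          ← List.head?_eq_getElem?]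
      have hpnl : text.toList[p]? ≠ some '\n' := by
        rw [← hup0]
        exact humin 0 (by omega)
      have hplen : p < text.toList.length := by omega
      have hA1 : ¬(((p : Int) - 1) + 1 < PySem.Str.len text ∧
          PySem.Str.pyGet? text (((p : Int) - 1) + 1) = some '\n') := by
        rw [e1, pvCond_iff]
        exact fun hcon => hpnl hcon.2
      have hsw : PySem.Chars.startswith ((pvLines text.toList).getD i []) [' '] = true ↔
          text.toList[p]? = some ' ' := by
        rw [PySem.Chars.startswith_iff, pv_prefix_singleton, hhead]
      rw [pvWalkB, if_neg hA1]
      by_cases hsp : text.toList[p]? = some ' '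
      · have hB2 : ¬(((p : Int) - 1) + 1 ≥ PySem.Str.len text ∨
            PySem.Str.pyGet? text (((p : Int) - 1) + 1) ≠ some ' ') := by
          rw [e1, pvCond2_iff]
          exact not_not.mpr ⟨hplen, hsp⟩
        rw [if_neg hB2, if_pos (Or.inr (hsw.mpr hsp)), hrest]
        have hm1 : (q : Int) = ((m + 1 : Nat) : Int) - 1 := by rw [hqm]; push_cast; ring
        rw [hm1]
        exact pvCorr text (m+1) (i+1) (by omega) (by omega) hdrop' hsum'
      · have hB2 : (((p : Int) - 1) + 1 ≥ PySem.Str.len text ∨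
            PySem.Str.pyGet? text (((p : Int) - 1) + 1) ≠ some ' ') := by
          rw [e1, pvCond2_iff]
          exact fun hcon => hsp hcon.2
        rw [if_pos hB2]
        rw [if_neg (by
          rintro (hcon | hcon)
          · exact hne hcon
          · exact hsp (hsw.mp hcon))]
        simp [hsum]
  termination_by text.toList.length - p
  decreasing_by all_goals omega

theorem pvWalkLines_bounds (L : List (List Char)) (last i i' : Nat)
    (h : pvWalkLines L last i = some i') : i ≤ i' ∧ i' ≤ last := by
  rw [pvWalkLines] at h
  by_cases hile : i ≤ last
  · rw [dif_pos hile] at h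
    split at h
    · split at h
      · cases h
      · cases h; omega
    · split at h
      · have := pvWalkLines_bounds L last (i+1) i' h
        omega
      · cases h; omega
  · rw [dif_neg hile] at h
    cases h
  termination_by last + 1 - i

theorem pvSumFirst_ge (L : List (List Char)) (n : Nat) (h : n ≤ L.length) :
    (n : Int) ≤ pvSumFirst L n := by
  induction n with
  | zero => simp [pvSumFirst]
  | succ k ih =>
    obtain ⟨l, hl⟩ : ∃ l, L[k]? = some l :=
      ⟨L[k]'(by omega), List.getElem?_eq_some_iff.mpr ⟨by omega, rfl⟩⟩
    rw [pvSumFirst_succ L k l hl]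
    have := ih (by omega)
    push_cast
    have hl0 : (0 : Int) ≤ l.length := by positivity
    omega

-- ===== VERDICT (by name: the statement is the Claim_ definition above) =====
theorem simple_extract_python_code_spec : Claim_equal_simple_extract_python_code := by
  intro text _
  unfold Spec_simple_extract_python_code simple_extract_python_code simple_extract_python_code_alt
  by_cases hstart : PySem.Str.find text "def " = -1
  · rw [if_pos hstart, if_pos hstart]
  · rw [if_neg hstart, if_neg hstart]
    have h0 : 0 ≤ PySem.Str.find text "def " := by
      have h1 := PySem.Chars.neg_one_le_find text.toList "def ".toList
      rw [← PySem.Str.find_eq] at h1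
      omega
    have hlen : PySem.Str.find text "def " ≤ (text.toList.length : Int) := by
      have h1 := PySem.Chars.find_le_length text.toList "def ".toList
      rw [← PySem.Str.find_eq] at h1
      exact h1
    obtain ⟨k, hk⟩ : ∃ k : Nat, PySem.Str.find text "def " = (k : Int) :=
      ⟨(PySem.Str.find text "def ").toNat, (Int.toNat_of_nonneg h0).symm⟩
    rw [hk] at hlen ⊢
    have hkl : k ≤ text.toList.length := by exact_mod_cast hlen
    have hsplit : PySem.Chars.splitOn text.toList "\n".toList = pvLines text.toList := by
      rw [show "\n".toList = ['\n'] from by decide, pvSplitOn_eq]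
    have hcnt : PySem.Str.count (PySem.Str.slice text none (some (k : Int))) "\n"
        = (text.toList.take k).count '\n' := by
      rw [PySem.Str.count_eq, show "\n".toList = ['\n'] from by decide]
      have hsl : (PySem.Str.slice text none (some (k : Int))).toList = text.toList.take k := by
        rw [PySem.Str.toList_slice]
        simp [pysem]
      rw [hsl, pvCount_eq]
    rw [hsplit, hcnt, pv_findFrom_eq_head text k hkl]
    cases hL : pvNl text k with
    | nil =>
      have hno : '\n' ∉ text.toList.drop k := pvNoNl_of_pvNl_nil text k hL
      have hcz : (text.toList.drop k).count '\n' = 0 := by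
        simpa using List.count_eq_zero.mpr hno
      have hall : (text.toList.take k).count '\n' = text.toList.count '\n' := by
        have := pvCount_take_drop text.toList k
        omega
      have hWL : pvWalkLines (pvLines text.toList) ((pvLines text.toList).length - 1)
          ((text.toList.take k).count '\n' + 1) = none := by
        rw [pvWalkLines, dif_neg (by rw [hall, pvLines_length]; omega)]
      simp [hWL, pvLoopA_neg_one]
    | cons q rest =>
      obtain ⟨m, hqm, hkm, hml, hmnl, hrest, hmin⟩ := pvNl_head text k q rest hL
      -- A side: reduce the outer loop by pvMain
      have hfuel : (pvNl text (m+1)).length + 2 ≤ text.toList.length + 2 := by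
        have h1 : (pvNl text (m+1)).length ≤ (pvNl text 0).length := pvNl_len_mono text (by omega)
        have h2 : (pvNl text 0).length ≤ (PySem.List.pyRange ((0:Nat) : Int) (PySem.Str.len text)).length :=
          List.length_filter_le _ _
        rw [PySem.List.length_pyRange_one] at h2
        simp [pysem] at h2
        have h3 : text.length = text.toList.length := rfl
        omega
      subst hqm
      rw [pvMain text (text.toList.length + 2) m hml hmnl hfuel, ← hrest]
      -- B side: line index and invariants at entry
      have hcongr : (text.toList.take m).count '\n' = (text.toList.take k).count '\n' :=
        pvCount_take_congr text.toList k m hkm hmin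
      obtain ⟨hP1, hP2, hP3⟩ := pvPrefix text.toList m hml hmnl
      rw [hcongr] at hP1 hP2 hP3
      have hCorr := pvCorr text (m+1) ((text.toList.take k).count '\n' + 1)
        (by omega) (by omega) hP2 (by rw [hP1]; push_cast; ring)
      have hm1 : ((m + 1 : Nat) : Int) - 1 = (m : Int) := by push_cast; ring
      rw [hm1, ← hrest] at hCorr
      cases hw : pvWalkLines (pvLines text.toList) ((pvLines text.toList).length - 1)
          ((text.toList.take k).count '\n' + 1) with
      | none =>
        rw [hw] at hCorr
        simp only at hCorr
        rw [← hCorr]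
        simp [hw]
      | some i' =>
        rw [hw] at hCorr
        simp only at hCorr
        rw [← hCorr]
        obtain ⟨hb1, hb2⟩ := pvWalkLines_bounds _ _ _ _ hw
        have hiL : i' ≤ (pvLines text.toList).length := by omega
        have hge : (i' : Int) ≤ pvSumFirst (pvLines text.toList) i' := pvSumFirst_ge _ i' hiL
        have hne : ¬(pvSumFirst (pvLines text.toList) i' - 1 = -1) := by omega
        simp only [hw]
        rw [if_neg hne, pvRangeSum _ i' hiL]
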